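-- pv_equiv track=rewrite | github.com/mortyc126-debug/SHA | step11_carry_segments.py | carry_from_gpk
-- ===== SOURCE A (Python) =====
-- def carry_from_gpk(gpk):
--     """Compute carry bits from GPK string."""
--     carries = [0]  # carry into bit 0 = 0
--     for k in range(len(gpk)):
--         if gpk[k] == 'G':
--             carries.append(1)
--         elif gpk[k] == 'K':
--             carries.append(0)
--         else:  # P
--             carries.append(carries[-1])
--     return carries[1:]  # carry OUT of each position
-- ===== SOURCE B (Python) =====
-- def carry_from_gpk(gpk):
--     """Compute carry bits from GPK string.
--
--     Block decomposition: the string is consumed run by run.  Each maximal run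
--     of non-decider characters repeats the current carry as one block; the
--     'G'/'K' decider that ends the run sets the carry for itself.
--     """
--     out = []
--     carry = 0
--     i = 0
--     n = len(gpk)
--     while i < n:
--         j = i
--         while j < n and gpk[j] != 'G' and gpk[j] != 'K':
--             j += 1
--         out += [carry] * (j - i)          # the propagate run keeps the carry
--         if j < n:
--             carry = 1 if gpk[j] == 'G' else 0
--             out.append(carry)             # the decider sets its own bit
--         i = j + 1
--     return out
-- ===== Notes on version B (the rewrite author's own statement) =====
-- stated objective: alternative
-- what changed: Replaces A's per-character loop that appends to and back-indexes a growing carries list (then slices off the seed) with a run-based decomposition: an inner loop finds each maximal run of non-decider characters, the run is emitted as one repeated block of the current carry, and each G/K decider sets its own bit.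
import Mathlib
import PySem

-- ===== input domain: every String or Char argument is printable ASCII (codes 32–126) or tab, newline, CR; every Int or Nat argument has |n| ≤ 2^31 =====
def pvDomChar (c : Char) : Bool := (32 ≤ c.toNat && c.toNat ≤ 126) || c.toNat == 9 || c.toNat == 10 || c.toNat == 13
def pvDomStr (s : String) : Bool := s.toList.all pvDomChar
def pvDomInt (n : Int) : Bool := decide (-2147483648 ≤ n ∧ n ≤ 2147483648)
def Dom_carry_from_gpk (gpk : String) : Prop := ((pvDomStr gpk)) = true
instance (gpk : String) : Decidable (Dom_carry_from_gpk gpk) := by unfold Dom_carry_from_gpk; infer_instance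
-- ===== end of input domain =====

-- B replaces A's per-character append/back-index loop by a run-based decomposition:
-- an inner loop finds each maximal run of non-decider characters, the run is emitted
-- as one repeated block of the current carry, and each 'G'/'K' sets its own bit
-- (objective: alternative).

-- ===== PORT A =====
-- A: carries = [0]; for each char append 1 / 0 / carries[-1]; return carries[1:].
-- carries is always nonempty, so carries[-1] is ported as getLast! (exact here).
def carry_from_gpk (gpk : String) : List Int :=
  let carries : List Int :=
    gpk.toList.foldl
      (fun carries c =>
        if c = 'G' then carries ++ [1]
        else if c = 'K' then carries ++ [0]
        else carries ++ [carries.getLast!]) [0]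
  carries.drop 1

-- ===== PORT B =====
-- inner loop of B: 'while j < n and gpk[j] != 'G' and gpk[j] != 'K': j += 1'
-- (gpk[j] is guarded by j < n, so getD is exact here)
def pvFindRun (cs : List Char) (n : Nat) (j : Nat) : Nat :=
  if j < n ∧ ¬ cs.getD j ' ' = 'G' ∧ ¬ cs.getD j ' ' = 'K' then pvFindRun cs n (j + 1)
  else j
termination_by n - j
decreasing_by omega

-- the inner loop only moves j forward (cited by pvGoB's termination proof)
theorem pvFindRun_ge (cs : List Char) (n : Nat) : ∀ i, i ≤ pvFindRun cs n i := by
  intro i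
  fun_induction pvFindRun cs n i with
  | case1 j h ih => omega
  | case2 j h => omega

-- outer 'while i < n' loop of B, threading out/carry/i
def pvGoB (cs : List Char) (n : Nat) (out : List Int) (carry : Int) (i : Nat) : List Int :=
  if h : i < n then
    let j := pvFindRun cs n i
    let out' := out ++ List.replicate (j - i) carry
    if j < n then
      let carry' : Int := if cs.getD j ' ' = 'G' then 1 else 0
      pvGoB cs n (out' ++ [carry']) carry' (j + 1)
    else
      pvGoB cs n out' carry (j + 1)
  else out
termination_by n - i
decreasing_by
  all_goals (have := pvFindRun_ge cs n i; omega)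

def carry_from_gpk_alt (gpk : String) : List Int :=
  pvGoB gpk.toList gpk.toList.length [] 0 0

-- ===== PRECONDITION & SPEC =====
def Spec_carry_from_gpk (gpk : String) (out : List Int) : Prop := out = carry_from_gpk_alt gpk
instance (gpk : String) (out : List Int) : Decidable (Spec_carry_from_gpk gpk out) := by unfold Spec_carry_from_gpk; infer_instance

-- ===== CLAIM (what is proved, stated in full; the proofs are below) =====
def Claim_equal_carry_from_gpk : Prop := ∀ (gpk : String), Dom_carry_from_gpk gpk → Spec_carry_from_gpk gpk (carry_from_gpk gpk)

-- ===== LEMMAS AND PROOFS =====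

-- reference: the carry scan, emitted element by element
def pvScan : List Char → Int → List Int
  | [], _ => []
  | c :: t, carry =>
      let v : Int := if c = 'G' then 1 else if c = 'K' then 0 else carry
      v :: pvScan t v

def pvFA : List Int → Char → List Int := fun carries c =>
  if c = 'G' then carries ++ [1]
  else if c = 'K' then carries ++ [0]
  else carries ++ [carries.getLast!]

-- A's fold is the seed followed by the scan from the seed's last carry.
theorem pv_A_scan (cs : List Char) : ∀ (pre : List Int) (carry : Int),
    cs.foldl pvFA (pre ++ [carry]) = (pre ++ [carry]) ++ pvScan cs carry := by
  induction cs with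
  | nil => intro pre carry; simp [pvScan]
  | cons c cs ih =>
    intro pre carry
    have hlast : (pre ++ [carry]).getLast! = carry := by
      cases pre with
      | nil => rfl
      | cons a as => simp [List.getLast!]
    simp only [List.foldl_cons]
    by_cases hG : c = 'G'
    · have h1 : pvFA (pre ++ [carry]) c = (pre ++ [carry]) ++ [1] := by simp [pvFA, hG]
      rw [h1, show (pre ++ [carry]) ++ [(1:Int)] = (pre ++ [carry]) ++ [1] from rfl, ih]
      simp [pvScan, hG]
    · by_cases hK : c = 'K'
      · have h1 : pvFA (pre ++ [carry]) c = (pre ++ [carry]) ++ [0] := by simp [pvFA, hK]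
        rw [h1, ih]
        simp [pvScan, hK]
      · have h1 : pvFA (pre ++ [carry]) c = (pre ++ [carry]) ++ [carry] := by
          simp [pvFA, hG, hK]
        rw [h1, ih]
        simp [pvScan, hG, hK]

theorem pvFindRun_le (cs : List Char) (n : Nat) : ∀ i, i ≤ n → pvFindRun cs n i ≤ n := by
  intro i
  fun_induction pvFindRun cs n i with
  | case1 j h ih => intro _; exact ih (by omega)
  | case2 j h => intro hj; exact hj

theorem pvFindRun_run (cs : List Char) (n : Nat) : ∀ i k, i ≤ k → k < pvFindRun cs n i →
    ¬ cs.getD k ' ' = 'G' ∧ ¬ cs.getD k ' ' = 'K' := by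
  intro i
  fun_induction pvFindRun cs n i with
  | case1 j h ih =>
    intro k hk hlt
    rcases Nat.eq_or_lt_of_le hk with rfl | hgt
    · exact ⟨h.2.1, h.2.2⟩
    · exact ih k (by omega) hlt
  | case2 j h => intro k hk hlt; omega

theorem pvFindRun_hit (cs : List Char) (n : Nat) : ∀ i, pvFindRun cs n i < n →
    cs.getD (pvFindRun cs n i) ' ' = 'G' ∨ cs.getD (pvFindRun cs n i) ' ' = 'K' := by
  intro i
  fun_induction pvFindRun cs n i with
  | case1 j h ih => exact ih
  | case2 j h =>
    intro hj
    by_contra hc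
    exact h ⟨hj, fun hg => hc (Or.inl hg), fun hk => hc (Or.inr hk)⟩

-- the scan over a run without deciders is one constant block
theorem pvScan_run (a b : List Char) (carry : Int)
    (h : ∀ c ∈ a, ¬ c = 'G' ∧ ¬ c = 'K') :
    pvScan (a ++ b) carry = List.replicate a.length carry ++ pvScan b carry := by
  induction a with
  | nil => simp
  | cons c a ih =>
    have hc := h c (by simp)
    simp [pvScan, hc.1, hc.2, ih (fun x hx => h x (by simp [hx])), List.replicate_succ]

-- main invariant: the outer loop appends the scan of the remaining suffix
theorem pv_B_scan (cs : List Char) (out : List Int) (carry : Int) (i : Nat) :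
    pvGoB cs cs.length out carry i = out ++ pvScan (cs.drop i) carry := by
  fun_induction pvGoB cs cs.length out carry i with
  | case1 out carry i hi j out' hj carry' ih =>
    have hjd : j = pvFindRun cs cs.length i := rfl
    have hij : i ≤ j := by rw [hjd]; exact pvFindRun_ge cs cs.length i
    have hrun : ∀ c ∈ (cs.drop i).take (j - i), ¬ c = 'G' ∧ ¬ c = 'K' := by
      intro c hc
      obtain ⟨t, ht, rfl⟩ := List.mem_iff_getElem.1 hc
      have ht' : t < j - i := by
        have := List.length_take_le (j - i) (cs.drop i)
        omega
      have htl : t < cs.length - i := by simp at ht; omega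
      have hk : ((cs.drop i).take (j - i))[t] = cs.getD (i + t) ' ' := by
        rw [List.getElem_take, List.getElem_drop, List.getD_eq_getElem]
      exact hk ▸ pvFindRun_run cs cs.length i (i + t) (by omega) (by rw [← hjd]; omega)
    have hsplit : cs.drop i = (cs.drop i).take (j - i) ++ cs.drop j := by
      conv_lhs => rw [← List.take_append_drop (j - i) (cs.drop i)]
      rw [List.drop_drop, show i + (j - i) = j from by omega]
    have hlen : ((cs.drop i).take (j - i)).length = j - i := by
      simp; omega
    have hhd : cs.drop j = cs[j] :: cs.drop (j + 1) := (List.getElem_cons_drop hj).symm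
    have hget : cs.getD j ' ' = cs[j] := List.getD_eq_getElem cs ' ' hj
    have hget2 : cs[j]?.getD ' ' = cs[j] := by simp [List.getElem?_eq_getElem hj]
    rw [ih, hsplit, pvScan_run _ _ _ hrun, hlen, hhd]
    have hv : pvScan (cs[j] :: cs.drop (j + 1)) carry = carry' :: pvScan (cs.drop (j + 1)) carry' := by
      have hhit := pvFindRun_hit cs cs.length i (by rw [← hjd]; exact hj)
      rw [← hjd, hget] at hhit
      rcases hhit with hG | hK
      · simp [pvScan, hG, carry', hget2]
      · have hne : ¬ cs[j] = 'G' := by rw [hK]; decide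
        simp [pvScan, hK, carry', hget2]
    rw [hv]
    simp [out']
  | case2 out carry i hi j out' hj ih =>
    have hjd : j = pvFindRun cs cs.length i := rfl
    have hij : i ≤ j := by rw [hjd]; exact pvFindRun_ge cs cs.length i
    have hje : j = cs.length := by
      have := pvFindRun_le cs cs.length i (by omega)
      rw [← hjd] at this
      omega
    have hrun : ∀ c ∈ cs.drop i, ¬ c = 'G' ∧ ¬ c = 'K' := by
      intro c hc
      obtain ⟨t, ht, rfl⟩ := List.mem_iff_getElem.1 hc
      have htl : t < cs.length - i := by simp at ht; omega
      have hk : (cs.drop i)[t] = cs.getD (i + t) ' ' := by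
        rw [List.getElem_drop, List.getD_eq_getElem]
      exact hk ▸ pvFindRun_run cs cs.length i (i + t) (by omega) (by rw [← hjd]; omega)
    have hnil : cs.drop (j + 1) = [] := List.drop_eq_nil_of_le (by omega)
    rw [ih, hnil]
    have := pvScan_run (cs.drop i) [] carry hrun
    simp at this
    rw [this]
    simp [out', pvScan]
    omega
  | case3 out carry i hi =>
    simp at hi
    rw [List.drop_eq_nil_of_le hi]
    simp [pvScan]

-- ===== VERDICT (by name: the statement is the Claim_ definition above) =====
theorem carry_from_gpk_spec : Claim_equal_carry_from_gpk := by
  intro gpk _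
  show carry_from_gpk gpk = carry_from_gpk_alt gpk
  show (gpk.toList.foldl pvFA ([] ++ [0])).drop 1 = pvGoB gpk.toList gpk.toList.length [] 0 0
  rw [pv_A_scan, pv_B_scan]
  simp
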